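-- pv_equiv track=rewrite | github.com/BuilderHut/komputerowo-zintegrowane-wytwarzanie | projekt-rpq/rpq_solver/metody_schrage.py | policz_cmax
-- ===== SOURCE A (Python) =====
-- def policz_cmax(tab, kolej):
--     t = 0
--     cmax = 0
--     for i in kolej:
--         z = tab[i]
--         if t < z["r"]:
--             t = z["r"]
--         t += z["p"]
--         if t + z["q"] > cmax:
--             cmax = t + z["q"]
--     return cmax
-- ===== SOURCE B (Python) =====
-- def policz_cmax(tab, kolej):
--     # Closed form: Cmax = max over last-jobs b of  max(0, max_{a<=b} r_a shifted) + sum p + q_b,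
--     # each candidate recomputed from its own suffix-sum scan (O(n^2)) instead of threading one running time.
--     best = 0
--     for b, ib in enumerate(kolej):
--         zb = tab[ib]
--         s = zb["p"]
--         m = zb["r"] + s
--         for i in reversed(kolej[:b]):
--             z = tab[i]
--             s += z["p"]
--             v = z["r"] + s
--             if v > m:
--                 m = v
--         t = s if s > m else m   # the schedule may also simply start at time 0
--         c = t + zb["q"]
--         if c > best:
--             best = c
--     return best
-- ===== Notes on version B (the rewrite author's own statement) =====
-- stated objective: alternative
-- what changed: A threads one running completion time and running max through a single fused loop; B uses the closed-form characterization Cmax = max_b (max(sum p over the prefix, max_{a<=b}(r_a + sum_{a..b} p)) + q_b) and recomputes each candidate from scratch by a backward suffix-sum scan per position (O(n^2), no carried time state).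
import Mathlib
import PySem

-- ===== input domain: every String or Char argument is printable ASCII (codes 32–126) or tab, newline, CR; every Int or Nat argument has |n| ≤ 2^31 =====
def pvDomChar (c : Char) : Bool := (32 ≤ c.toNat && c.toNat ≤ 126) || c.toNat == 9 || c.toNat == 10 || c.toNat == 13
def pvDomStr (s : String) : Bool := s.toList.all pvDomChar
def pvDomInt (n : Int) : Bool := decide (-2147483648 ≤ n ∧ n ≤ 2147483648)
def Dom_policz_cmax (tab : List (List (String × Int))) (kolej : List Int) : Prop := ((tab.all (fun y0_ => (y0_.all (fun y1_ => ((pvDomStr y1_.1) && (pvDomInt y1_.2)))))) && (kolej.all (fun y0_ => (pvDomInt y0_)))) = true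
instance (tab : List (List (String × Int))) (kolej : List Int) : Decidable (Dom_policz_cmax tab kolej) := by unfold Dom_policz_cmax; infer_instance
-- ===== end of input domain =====

-- B replaces A's fused running-time loop by the closed form Cmax = max_b (max over start positions a<=b
-- of r_a + sum p[a..b], or the time-0 start) + q_b, recomputed per position by a backward suffix-sum scan
-- (O(n^2) vs A's O(n)); objective: alternative algorithm, not speed.


-- dict lookup z[k] (first match); the default 0 is never reached under Pre_ (missing key = KeyError)
def pvLook (z : List (String × Int)) (k : String) : Int := (z.lookup k).getD 0

-- ===== PORT A =====
-- one fused loop carrying (t, cmax); the none-branch (IndexError) keeps the state, excluded by Pre_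
def pvStepA (tab : List (List (String × Int))) (st : Int × Int) (i : Int) : Int × Int :=
  match PySem.List.pyGet? tab i with
  | none => st
  | some z =>
    let t := st.1
    let t := if t < pvLook z "r" then pvLook z "r" else t
    let t := t + pvLook z "p"
    let cmax := if t + pvLook z "q" > st.2 then t + pvLook z "q" else st.2
    (t, cmax)

def policz_cmax (tab : List (List (String × Int))) (kolej : List Int) : Int :=
  (kolej.foldl (pvStepA tab) (0, 0)).2

-- ===== PORT B =====
-- inner loop body: 's += z["p"]; v = z["r"] + s; if v > m: m = v' over reversed(kolej[:b])
def pvInnerB (tab : List (List (String × Int))) (st : Int × Int) (i : Int) : Int × Int :=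
  let z := (PySem.List.pyGet? tab i).getD []
  let s := st.1 + pvLook z "p"
  let v := pvLook z "r" + s
  (s, if v > st.2 then v else st.2)

-- outer loop over enumerate(kolej): candidate for last job b recomputed from its own suffix scan
def policz_cmax_alt (tab : List (List (String × Int))) (kolej : List Int) : Int :=
  (PySem.List.enumerate kolej 0).foldl (fun best bi =>
    let zb := (PySem.List.pyGet? tab bi.2).getD []
    let s := pvLook zb "p"
    let m := pvLook zb "r" + s
    let sm := ((PySem.List.slice kolej none (some bi.1)).reverse).foldl (pvInnerB tab) (s, m)
    let t := if sm.1 > sm.2 then sm.1 else sm.2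
    let c := t + pvLook zb "q"
    if c > best then c else best) 0

-- ===== PRECONDITION & SPEC =====
-- Pre_ excludes exactly the inputs where A raises: an index outside tab (IndexError) or a dict missing "r"/"p"/"q" (KeyError).
def Pre_policz_cmax (tab : List (List (String × Int))) (kolej : List Int) : Prop :=
  ∀ i ∈ kolej, ((PySem.List.pyGet? tab i).any
    (fun z => (z.lookup "r").isSome && (z.lookup "p").isSome && (z.lookup "q").isSome)) = true
instance (tab : List (List (String × Int))) (kolej : List Int) : Decidable (Pre_policz_cmax tab kolej) := by unfold Pre_policz_cmax; infer_instance

def pvWitness_policz_cmax : (List (List (String × Int))) × List Int :=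
  ([[("r", 1), ("p", 2), ("q", 3)], [("r", 0), ("p", 1), ("q", 5)]], [1, 0])

def Spec_policz_cmax (tab : List (List (String × Int))) (kolej : List Int) (out : Int) : Prop := out = policz_cmax_alt tab kolej
instance (tab : List (List (String × Int))) (kolej : List Int) (out : Int) : Decidable (Spec_policz_cmax tab kolej out) := by unfold Spec_policz_cmax; infer_instance

-- ===== CLAIM (what is proved, stated in full; the proofs are below) =====
def Claim_equal_policz_cmax : Prop := ∀ (tab : List (List (String × Int))) (kolej : List Int), Dom_policz_cmax tab kolej → Pre_policz_cmax tab kolej → Spec_policz_cmax tab kolej (policz_cmax tab kolej)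

-- ===== LEMMAS AND PROOFS =====
-- proof-side shorthands for the three fields of job i
def pvJob (tab : List (List (String × Int))) (i : Int) : List (String × Int) :=
  (PySem.List.pyGet? tab i).getD []
def pvRr (tab : List (List (String × Int))) (i : Int) : Int := pvLook (pvJob tab i) "r"
def pvPp (tab : List (List (String × Int))) (i : Int) : Int := pvLook (pvJob tab i) "p"
def pvQq (tab : List (List (String × Int))) (i : Int) : Int := pvLook (pvJob tab i) "q"

-- A's running completion time over a list of jobs
def pvT (tab : List (List (String × Int))) (t : Int) (l : List Int) : Int :=
  l.foldl (fun t i => max t (pvRr tab i) + pvPp tab i) t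

-- closed recursion computing B's inner fold (foldl over the reverse = foldr)
def pvR (tab : List (List (String × Int))) (l : List Int) (s0 m0 : Int) : Int × Int :=
  match l with
  | [] => (s0, m0)
  | x :: xs =>
    let rp := pvR tab xs s0 m0
    let s := rp.1 + pvPp tab x
    let v := pvRr tab x + s
    (s, if v > rp.2 then v else rp.2)

theorem pvInner_eq_pvR (tab : List (List (String × Int))) :
    ∀ (l : List Int) (s0 m0 : Int),
      (l.reverse.foldl (pvInnerB tab) (s0, m0)) = pvR tab l s0 m0 := by
  intro l s0 m0
  rw [List.foldl_reverse]
  induction l with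
  | nil => rfl
  | cons x xs ih => simp only [List.foldr_cons, ih]; rfl

-- the key bridge: B's suffix-scan result equals A's running time over the same prefix
theorem pvQ (tab : List (List (String × Int))) :
    ∀ (l : List Int) (t s0 m0 : Int),
      max (t + (pvR tab l s0 m0).1) (pvR tab l s0 m0).2 = max (pvT tab t l + s0) m0 := by
  intro l
  induction l with
  | nil => intro t s0 m0; simp [pvR, pvT]
  | cons x xs ih =>
    intro t s0 m0
    have h := ih (max t (pvRr tab x) + pvPp tab x) s0 m0
    simp only [pvR, pvT, List.foldl_cons] at *
    split_ifs at * <;> omega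

-- A's step under Pre_, in max form
theorem pvStepA_eq (tab : List (List (String × Int))) (i : Int) (t c : Int)
    (h : ((PySem.List.pyGet? tab i).any
      (fun z => (z.lookup "r").isSome && (z.lookup "p").isSome && (z.lookup "q").isSome)) = true) :
    pvStepA tab (t, c) i =
      (max t (pvRr tab i) + pvPp tab i,
       max c (max t (pvRr tab i) + pvPp tab i + pvQq tab i)) := by
  cases hz : PySem.List.pyGet? tab i with
  | none => rw [hz] at h; simp at h
  | some z =>
    simp only [pvStepA, hz, pvRr, pvPp, pvQq, pvJob, Option.getD_some]
    refine Prod.ext ?_ ?_ <;> simp only [] <;> split_ifs <;> omega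

-- main invariant: A's fused loop over the suffix = B's enumerate loop over the suffix,
-- given that t is A's time over the consumed prefix
theorem pvMain (tab : List (List (String × Int))) (kolej : List Int)
    (hpre : ∀ i ∈ kolej, ((PySem.List.pyGet? tab i).any
      (fun z => (z.lookup "r").isSome && (z.lookup "p").isSome && (z.lookup "q").isSome)) = true) :
    ∀ (rest pre : List Int) (t best : Int),
      pre ++ rest = kolej → t = pvT tab 0 pre →
      (rest.foldl (pvStepA tab) (t, best)).2 =
      (PySem.List.enumerate rest (pre.length : Int)).foldl (fun best bi =>
        let zb := (PySem.List.pyGet? tab bi.2).getD []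
        let s := pvLook zb "p"
        let m := pvLook zb "r" + s
        let sm := ((PySem.List.slice kolej none (some bi.1)).reverse).foldl (pvInnerB tab) (s, m)
        let t := if sm.1 > sm.2 then sm.1 else sm.2
        let c := t + pvLook zb "q"
        if c > best then c else best) best := by
  intro rest
  induction rest with
  | nil => intro pre t best _ _; simp [PySem.List.enumerate]
  | cons i rest' ih =>
    intro pre t best hsplit ht
    have hi : i ∈ kolej := by rw [← hsplit]; simp
    have hstep := pvStepA_eq tab i t best (hpre i hi)
    rw [List.foldl_cons, hstep, PySem.List.enumerate_cons, List.foldl_cons]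
    -- simplify B's first step
    have hslice : PySem.List.slice kolej none (some (pre.length : Int)) = pre := by
      rw [PySem.List.slice_to_natCast, ← hsplit, List.take_left]
    have hq := pvQ tab pre 0 (pvPp tab i) (pvRr tab i + pvPp tab i)
    simp only [hslice, pvInner_eq_pvR]
    have hEq : (if ((pvR tab pre (pvPp tab i) (pvRr tab i + pvPp tab i)).1 >
          (pvR tab pre (pvPp tab i) (pvRr tab i + pvPp tab i)).2)
        then (pvR tab pre (pvPp tab i) (pvRr tab i + pvPp tab i)).1
        else (pvR tab pre (pvPp tab i) (pvRr tab i + pvPp tab i)).2) =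
        max t (pvRr tab i) + pvPp tab i := by
      rw [ht]; split_ifs at * <;> omega
    -- fold the remaining suffix with the extended prefix
    have hlen : ((pre ++ [i]).length : Int) = (pre.length : Int) + 1 := by
      simp [List.length_append]
    have hrec := ih (pre ++ [i]) (max t (pvRr tab i) + pvPp tab i) (max best (max t (pvRr tab i) + pvPp tab i + pvQq tab i))
      (by rw [List.append_assoc]; simpa using hsplit)
      (by rw [ht]; simp [pvT, List.foldl_append])
    rw [hlen] at hrec
    simp only [pvRr, pvPp, pvJob] at hEq
    rw [hEq]
    simp only [pvRr, pvPp, pvQq, pvJob] at hrec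
    have hmax : (if max t (pvLook ((PySem.List.pyGet? tab i).getD []) "r") + pvLook ((PySem.List.pyGet? tab i).getD []) "p" + pvLook ((PySem.List.pyGet? tab i).getD []) "q" > best
        then max t (pvLook ((PySem.List.pyGet? tab i).getD []) "r") + pvLook ((PySem.List.pyGet? tab i).getD []) "p" + pvLook ((PySem.List.pyGet? tab i).getD []) "q" else best) =
        max best (max t (pvLook ((PySem.List.pyGet? tab i).getD []) "r") + pvLook ((PySem.List.pyGet? tab i).getD []) "p" + pvLook ((PySem.List.pyGet? tab i).getD []) "q") := by
      split_ifs <;> omega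
    rw [hmax]
    simp only [pvInner_eq_pvR] at hrec
    simp only [pvRr, pvPp, pvQq, pvJob]
    exact hrec

-- ===== VERDICT (by name: the statement is the Claim_ definition above) =====
theorem policz_cmax_spec : Claim_equal_policz_cmax := by
  intro tab kolej _ hpre
  unfold Spec_policz_cmax policz_cmax policz_cmax_alt
  have h := pvMain tab kolej hpre kolej [] 0 0 (by simp) (by simp [pvT])
  simpa using h
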